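-- pv_equiv track=rewrite | github.com/bleonheart/Lilia | strip_function_docs.py | repair_indent_artifacts
-- ===== SOURCE A (Python) =====
-- def repair_indent_artifacts(text: str) -> tuple[str, int]:
--     lines = text.splitlines(keepends=True)
--     changed = 0
--     prev_sig = ""
--     prev_indent = 0
--     for idx, line in enumerate(lines):
--         s = line.rstrip("\r\n")
--         if s.strip() == "":
--             continue
--
--         cur_indent = len(s) - len(s.lstrip(" "))
--         cur_stripped = s.lstrip(" ")
--
--         is_function_decl = cur_stripped.startswith("function ") or cur_stripped.startswith("local function ")
--         if is_function_decl:
--             prev_sig_stripped = prev_sig.strip()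
--             if prev_sig_stripped in ("then", "else", "do") or prev_sig_stripped.endswith((" then", " else", " do")):
--                 if cur_indent >= prev_indent + 8:
--                     new_indent = prev_indent + 4
--                     lines[idx] = (" " * new_indent) + cur_stripped + (line[len(s) :])
--                     changed += 1
--             elif prev_sig_stripped == "end":
--                 if cur_indent >= prev_indent + 4:
--                     new_indent = prev_indent
--                     lines[idx] = (" " * new_indent) + cur_stripped + (line[len(s) :])
--                     changed += 1
--
--         prev_sig = s
--         prev_indent = cur_indent
--
--     return "".join(lines), changed
-- ===== SOURCE B (Python) =====
-- def repair_indent_artifacts(text: str) -> tuple[str, int]: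
--     lines = text.splitlines(keepends=True)
--     out = list(lines)
--     changed = 0
--     for idx, line in enumerate(lines):
--         s = line.rstrip("\r\n")
--         body = s.lstrip(" ")
--         if not (body.startswith("function ") or body.startswith("local function ")):
--             continue
--         # locate the previous significant line by scanning backwards
--         j = idx - 1
--         while j >= 0 and lines[j].strip() == "":
--             j -= 1
--         if j < 0:
--             continue
--         p = lines[j].rstrip("\r\n")
--         ps = p.strip()
--         pind = len(p) - len(p.lstrip(" "))
--         ind = len(s) - len(body)
--         if ps in ("then", "else", "do") or ps.endswith((" then", " else", " do")):
--             if ind >= pind + 8: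
--                 out[idx] = " " * (pind + 4) + body + line[len(s):]
--                 changed += 1
--         elif ps == "end":
--             if ind >= pind + 4:
--                 out[idx] = " " * pind + body + line[len(s):]
--                 changed += 1
--     return "".join(out), changed
-- ===== Notes on version B (the rewrite author's own statement) =====
-- stated objective: alternative
-- what changed: A is a single forward scan carrying prev_sig/prev_indent state across every line; B drops the carried state entirely: it visits only function-declaration lines and for each one performs a backward search through the original line list for the nearest significant predecessor, writing fixes into a separate output copy.
import Mathlib
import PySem

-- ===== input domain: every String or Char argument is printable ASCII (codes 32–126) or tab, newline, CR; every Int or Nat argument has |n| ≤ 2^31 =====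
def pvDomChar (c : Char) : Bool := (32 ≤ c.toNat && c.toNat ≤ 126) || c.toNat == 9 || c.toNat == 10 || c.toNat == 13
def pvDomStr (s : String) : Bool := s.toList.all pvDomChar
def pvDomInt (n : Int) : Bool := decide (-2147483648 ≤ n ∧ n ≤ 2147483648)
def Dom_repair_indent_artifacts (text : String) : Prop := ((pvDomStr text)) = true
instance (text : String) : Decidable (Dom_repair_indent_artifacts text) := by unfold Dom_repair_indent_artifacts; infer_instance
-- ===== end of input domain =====

-- B replaces A's forward carried-state scan by a per-declaration backward search for the previous significant line (alternative decomposition, same practical cost; equivalence is about the return value only).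


-- ===== PORT A =====
-- shared primitives (both Pythons call the same built-ins):
-- text.splitlines(keepends=True): hand port, exact on the ASCII domain (line breaks there are only '\n', '\r', '\r\n')
def pvSplitlinesKeepGo : List Char → List Char → List (List Char)
  | acc, [] => if acc.isEmpty then [] else [acc.reverse]
  | acc, '\r' :: '\n' :: rest => (acc.reverse ++ ['\r', '\n']) :: pvSplitlinesKeepGo [] rest
  | acc, c :: rest =>
    if c = '\n' then (acc.reverse ++ ['\n']) :: pvSplitlinesKeepGo [] rest
    else if c = '\r' then (acc.reverse ++ ['\r']) :: pvSplitlinesKeepGo [] rest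
    else pvSplitlinesKeepGo (c :: acc) rest

def pvSplitlinesKeep (cs : List Char) : List (List Char) := pvSplitlinesKeepGo [] cs

-- s.rstrip("\r\n"): exact (strips any mix of '\r'/'\n' from the right)
def pvRstripCRLF (cs : List Char) : List Char :=
  (cs.reverse.dropWhile (fun c => c == '\r' || c == '\n')).reverse

-- the body of A's for-loop; state = (lines, changed, prev_sig, prev_indent).
-- Python mutates `lines` only at the index already consumed by enumerate, so iterating the
-- original list is exact.  line.drop s.length = line[len(s):] (0 ≤ len(s) ≤ len(line));
-- List.replicate k.toNat ' ' = " " * k (k is never negative here).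
def pvAStep (st : List (List Char) × Int × List Char × Int) (p : Int × List Char) :
    List (List Char) × Int × List Char × Int :=
  let lines := st.1
  let changed := st.2.1
  let prev_sig := st.2.2.1
  let prev_indent := st.2.2.2
  let idx := p.1
  let line := p.2
  let s := pvRstripCRLF line
  if PySem.Chars.strip s = [] then st
  else
    let cur_stripped := s.dropWhile (fun c => c == ' ')
    let cur_indent : Int := (s.length : Int) - (cur_stripped.length : Int)
    let lc :=
      if PySem.Chars.startswith cur_stripped "function ".toList
          || PySem.Chars.startswith cur_stripped "local function ".toList then
        let pss := PySem.Chars.strip prev_sig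
        if pss == "then".toList || pss == "else".toList || pss == "do".toList
            || PySem.Chars.endswith pss " then".toList
            || PySem.Chars.endswith pss " else".toList
            || PySem.Chars.endswith pss " do".toList then
          if prev_indent + 8 ≤ cur_indent then
            (lines.set idx.toNat
              (List.replicate (prev_indent + 4).toNat ' ' ++ cur_stripped ++ line.drop s.length),
             changed + 1)
          else (lines, changed)
        else if pss == "end".toList then
          if prev_indent + 4 ≤ cur_indent then
            (lines.set idx.toNat
              (List.replicate prev_indent.toNat ' ' ++ cur_stripped ++ line.drop s.length),
             changed + 1)
          else (lines, changed)
        else (lines, changed)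
      else (lines, changed)
    (lc.1, lc.2, s, cur_indent)

def repair_indent_artifacts (text : String) : String × Int :=
  let lines := pvSplitlinesKeep text.toList
  let r := (PySem.List.enumerate lines 0).foldl pvAStep (lines, 0, ([] : List Char), 0)
  (String.ofList (PySem.Chars.join [] r.1), r.2.1)

-- ===== PORT B =====
-- B's `while j >= 0 and lines[j].strip() == "": j -= 1` walks backwards through the ORIGINAL
-- lines; transliterated as recursion over the reversed prefix lines[:idx] (same visits, same test)
def pvFindPrevB : List (List Char) → Option (List Char)
  | [] => none
  | l :: rest => if PySem.Chars.strip l = [] then pvFindPrevB rest else some l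

-- B's loop body; state = (out, changed); `lines` is the untouched input list B reads from
def pvBStep (lines : List (List Char)) (st : List (List Char) × Int) (pr : Int × List Char) :
    List (List Char) × Int :=
  let idx := pr.1
  let line := pr.2
  let s := pvRstripCRLF line
  let body := s.dropWhile (fun c => c == ' ')
  if PySem.Chars.startswith body "function ".toList
      || PySem.Chars.startswith body "local function ".toList then
    match pvFindPrevB ((lines.take idx.toNat).reverse) with
    | none => st
    | some praw =>
      let p := pvRstripCRLF praw
      let ps := PySem.Chars.strip p
      let pind : Int := (p.length : Int) - ((p.dropWhile (fun c => c == ' ')).length : Int)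
      let ind : Int := (s.length : Int) - (body.length : Int)
      if ps == "then".toList || ps == "else".toList || ps == "do".toList
          || PySem.Chars.endswith ps " then".toList
          || PySem.Chars.endswith ps " else".toList
          || PySem.Chars.endswith ps " do".toList then
        if pind + 8 ≤ ind then
          (st.1.set idx.toNat (List.replicate (pind + 4).toNat ' ' ++ body ++ line.drop s.length),
           st.2 + 1)
        else st
      else if ps == "end".toList then
        if pind + 4 ≤ ind then
          (st.1.set idx.toNat (List.replicate pind.toNat ' ' ++ body ++ line.drop s.length),
           st.2 + 1)
        else st
      else st
  else st

def repair_indent_artifacts_alt (text : String) : String × Int :=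
  let lines := pvSplitlinesKeep text.toList
  let r := (PySem.List.enumerate lines 0).foldl (pvBStep lines) (lines, 0)
  (String.ofList (PySem.Chars.join [] r.1), r.2)

-- ===== PRECONDITION & SPEC =====
def Spec_repair_indent_artifacts (text : String) (out : String × Int) : Prop := out = repair_indent_artifacts_alt text
instance (text : String) (out : String × Int) : Decidable (Spec_repair_indent_artifacts text out) := by unfold Spec_repair_indent_artifacts; infer_instance

-- ===== CLAIM (what is proved, stated in full; the proofs are below) =====
def Claim_equal_repair_indent_artifacts : Prop := ∀ (text : String), Dom_repair_indent_artifacts text → Spec_repair_indent_artifacts text (repair_indent_artifacts text)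

-- ===== LEMMAS AND PROOFS =====


-- dropWhile membership helpers
lemma pvMemOfDropWhile {p : Char → Bool} {l : List Char} {c : Char}
    (h : c ∈ List.dropWhile p l) : c ∈ l :=
  (List.dropWhile_sublist (l := l) (p := p)).subset h

lemma pvMemDropWhileOf {p : Char → Bool} {l : List Char} {c : Char}
    (hc : c ∈ l) (hp : p c ≠ true) : c ∈ List.dropWhile p l := by
  induction l with
  | nil => cases hc
  | cons a t ih =>
    rw [List.dropWhile_cons]
    rcases List.mem_cons.mp hc with rfl | hct
    · have : p c = false := Bool.not_eq_true _ |>.mp hp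
      simp [this]
    · by_cases ha : p a = true
      · simp [ha]; exact ih hct
      · simp [Bool.not_eq_true _ |>.mp ha]; exact Or.inr hct

-- strip s = [] iff every character is whitespace
lemma pvStrip_eq_nil_iff (s : List Char) :
    PySem.Chars.strip s = [] ↔ ∀ c ∈ s, PySem.Chars.isspace c = true := by
  unfold PySem.Chars.strip PySem.Chars.rstrip PySem.Chars.lstrip
  simp only [List.reverse_eq_nil_iff, List.dropWhile_eq_nil_iff, List.mem_reverse]
  constructor
  · intro h c hc
    by_cases hcs : PySem.Chars.isspace c = true
    · exact hcs
    · exact h c (pvMemDropWhileOf hc hcs) 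
  · intro h c hc
    exact h c (pvMemOfDropWhile hc)

-- rstrip("\r\n") preserves blankness
lemma pvStrip_rstripCRLF_eq_nil (l : List Char) :
    (PySem.Chars.strip (pvRstripCRLF l) = []) ↔ (PySem.Chars.strip l = []) := by
  rw [pvStrip_eq_nil_iff, pvStrip_eq_nil_iff]
  constructor
  · intro h c hc
    by_cases hcr : (c == '\r' || c == '\n') = true
    · rcases Bool.or_eq_true_iff.mp hcr with h1 | h1
      · rw [beq_iff_eq.mp h1]; decide
      · rw [beq_iff_eq.mp h1]; decide
    · apply h
      unfold pvRstripCRLF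
      rw [List.mem_reverse]
      exact pvMemDropWhileOf (List.mem_reverse.mpr hc) (by simp [hcr])
  · intro h c hc
    apply h
    unfold pvRstripCRLF at hc
    rw [List.mem_reverse] at hc
    exact List.mem_reverse.mp (pvMemOfDropWhile hc)

-- a blank line is never a function declaration
lemma pvBlank_not_decl (s : List Char) (h : PySem.Chars.strip s = []) :
    (PySem.Chars.startswith (s.dropWhile (fun c => c == ' ')) "function ".toList
      || PySem.Chars.startswith (s.dropWhile (fun c => c == ' ')) "local function ".toList) = false := by
  rw [pvStrip_eq_nil_iff] at h
  cases hd : s.dropWhile (fun c => c == ' ') with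
  | nil => decide
  | cons c t =>
    have hc : c ∈ s := by
      have : c ∈ s.dropWhile (fun c => c == ' ') := by rw [hd]; exact List.mem_cons_self
      exact pvMemOfDropWhile this
    have hsp : PySem.Chars.isspace c = true := h c hc
    have hf : c ≠ 'f' := by rintro rfl; simp [PySem.Chars.isspace] at hsp
    have hl : c ≠ 'l' := by rintro rfl; simp [PySem.Chars.isspace] at hsp
    apply Bool.or_eq_false_iff.mpr
    constructor
    · apply Bool.not_eq_true _ |>.mp
      intro hsw
      have := PySem.Chars.startswith_iff _ _ |>.mp hsw
      rcases this with ⟨r, hr⟩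
      rw [show ("function ".toList) = 'f' :: "unction ".toList from rfl] at hr
      simp [List.cons_append] at hr
      exact hf hr.1.symm
    · apply Bool.not_eq_true _ |>.mp
      intro hsw
      have := PySem.Chars.startswith_iff _ _ |>.mp hsw
      rcases this with ⟨r, hr⟩
      rw [show ("local function ".toList) = 'l' :: "ocal function ".toList from rfl] at hr
      simp [List.cons_append] at hr
      exact hl hr.1.symm

-- the (prev_sig, prev_indent) pair A carries, recovered from the prefix by B's backward search
def pvPrevPair (pre : List (List Char)) : List Char × Int :=
  match pvFindPrevB pre.reverse with
  | none => ([], 0)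
  | some praw =>
    let p := pvRstripCRLF praw
    (p, (p.length : Int) - ((p.dropWhile (fun c => c == ' ')).length : Int))

lemma pvPrevPair_blank (pre : List (List Char)) (l : List Char)
    (h : PySem.Chars.strip l = []) : pvPrevPair (pre ++ [l]) = pvPrevPair pre := by
  unfold pvPrevPair
  rw [List.reverse_append]
  simp [pvFindPrevB, h]

lemma pvPrevPair_sig (pre : List (List Char)) (l : List Char)
    (h : ¬ PySem.Chars.strip l = []) :
    pvPrevPair (pre ++ [l]) =
      (pvRstripCRLF l,
       ((pvRstripCRLF l).length : Int) - (((pvRstripCRLF l).dropWhile (fun c => c == ' ')).length : Int)) := by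
  unfold pvPrevPair
  rw [List.reverse_append]
  simp [pvFindPrevB, h]

-- main invariant: A's carried-state fold over a suffix equals B's backward-searching fold,
-- provided A's carried pair is what B's backward search recovers from the processed prefix
lemma pvMain (rest pre : List (List Char)) (L : List (List Char)) (c : Int) :
    (((PySem.List.enumerate rest (pre.length : Int)).foldl pvAStep
        (L, c, (pvPrevPair pre).1, (pvPrevPair pre).2)).1,
     ((PySem.List.enumerate rest (pre.length : Int)).foldl pvAStep
        (L, c, (pvPrevPair pre).1, (pvPrevPair pre).2)).2.1)
      = (PySem.List.enumerate rest (pre.length : Int)).foldl (pvBStep (pre ++ rest)) (L, c) := by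
  induction rest generalizing pre L c with
  | nil => simp [PySem.List.enumerate]
  | cons line rest ih =>
    rw [PySem.List.enumerate_cons]
    simp only [List.foldl_cons]
    have htake : List.take pre.length (pre ++ line :: rest) = pre := List.take_left' rfl
    by_cases h : PySem.Chars.strip (pvRstripCRLF line) = []
    · -- blank line: A leaves its whole state, B's decl test fails
      have hA : pvAStep (L, c, (pvPrevPair pre).1, (pvPrevPair pre).2) ((pre.length : Int), line)
          = (L, c, (pvPrevPair pre).1, (pvPrevPair pre).2) := by
        unfold pvAStep; simp [h]
      have hB : pvBStep (pre ++ line :: rest) (L, c) ((pre.length : Int), line) = (L, c) := by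
        simp only [pvBStep, pvBlank_not_decl _ h]
        rfl
      rw [hA, hB]
      have hpre : pvPrevPair (pre ++ [line]) = pvPrevPair pre := by
        exact pvPrevPair_blank pre line ((pvStrip_rstripCRLF_eq_nil line).mp h)
      have := ih (pre ++ [line]) L c
      rw [hpre] at this
      simpa using this
    · -- significant line
      set s := pvRstripCRLF line with hs
      set body := s.dropWhile (fun c => c == ' ') with hb
      have hAB : (pvAStep (L, c, (pvPrevPair pre).1, (pvPrevPair pre).2) ((pre.length : Int), line)).1
            = (pvBStep (pre ++ line :: rest) (L, c) ((pre.length : Int), line)).1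
          ∧ (pvAStep (L, c, (pvPrevPair pre).1, (pvPrevPair pre).2) ((pre.length : Int), line)).2.1
            = (pvBStep (pre ++ line :: rest) (L, c) ((pre.length : Int), line)).2
          ∧ (pvAStep (L, c, (pvPrevPair pre).1, (pvPrevPair pre).2) ((pre.length : Int), line)).2.2
            = (pvPrevPair (pre ++ [line])) := by
        simp only [pvAStep, pvBStep, Int.toNat_natCast, htake]
        rw [pvPrevPair_sig pre line ((pvStrip_rstripCRLF_eq_nil line).not.mp h ∘ id)]
        simp only [← hs, h, if_false, ← hb]
        by_cases hd : (PySem.Chars.startswith body "function ".toList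
            || PySem.Chars.startswith body "local function ".toList) = true
        · rw [hd]
          unfold pvPrevPair
          cases hp : pvFindPrevB pre.reverse with
          | none =>
            have e1 : PySem.Chars.endswith ([] : List Char) [' ', 't', 'h', 'e', 'n'] = false := by
              decide
            have e2 : PySem.Chars.endswith ([] : List Char) [' ', 'e', 'l', 's', 'e'] = false := by
              decide
            have e3 : PySem.Chars.endswith ([] : List Char) [' ', 'd', 'o'] = false := by decide
            refine ⟨?_, ?_, ?_⟩ <;>
              simp [show PySem.Chars.strip ([] : List Char) = [] from rfl, e1, e2, e3]
          | some praw =>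
            exact ⟨by trivial, by trivial, by trivial⟩
        · rw [Bool.not_eq_true] at hd
          rw [hd]
          simp
      obtain ⟨h1, h2, h3⟩ := hAB
      have := ih (pre ++ [line])
        (pvBStep (pre ++ line :: rest) (L, c) ((pre.length : Int), line)).1
        (pvBStep (pre ++ line :: rest) (L, c) ((pre.length : Int), line)).2
      rw [show (pre ++ [line]) ++ rest = pre ++ line :: rest by simp] at this
      rw [show ((pre ++ [line]).length : Int) = (pre.length : Int) + 1 by simp] at this
      have hA1 : pvAStep (L, c, (pvPrevPair pre).1, (pvPrevPair pre).2) ((pre.length : Int), line)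
          = ((pvBStep (pre ++ line :: rest) (L, c) ((pre.length : Int), line)).1,
             (pvBStep (pre ++ line :: rest) (L, c) ((pre.length : Int), line)).2,
             (pvPrevPair (pre ++ [line])).1, (pvPrevPair (pre ++ [line])).2) := by
        rw [← h1, ← h2]
        rw [show ((pvPrevPair (pre ++ [line])).1, (pvPrevPair (pre ++ [line])).2)
            = pvPrevPair (pre ++ [line]) from rfl, ← h3]
      rw [hA1]
      exact this

-- ===== VERDICT (by name: the statement is the Claim_ definition above) =====
theorem repair_indent_artifacts_spec : Claim_equal_repair_indent_artifacts := by
  intro text _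
  unfold Spec_repair_indent_artifacts
  have h := pvMain (pvSplitlinesKeep text.toList) [] (pvSplitlinesKeep text.toList) 0
  simp only [List.nil_append, List.length_nil, Nat.cast_zero] at h
  simp only [repair_indent_artifacts, repair_indent_artifacts_alt]
  rw [← h]
  rfl
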